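-- pv_equiv track=rewrite | github.com/lucas624/teg-calc | main.py | inc_dados
-- ===== SOURCE A (Python) =====
-- def inc_dados(dados):
--     dados[-1] += 1
--     while True:
--         try:
--             index = dados.index(7)
--         except ValueError:
--             return dados
--         dados[index]   = 1
--         dados[index-1] += 1
-- ===== SOURCE B (Python) =====
-- def inc_dados(dados):
--     # One initial scan collects every position holding a 7 into a worklist;
--     # each carry is then propagated locally, walking left through the 7s it
--     # creates.  Mutates dados in place, like the original.
--     dados[-1] += 1
--     n = len(dados)
--     pending = [i for i, v in enumerate(dados) if v == 7]
--     k = 0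
--     while k < len(pending):
--         p = pending[k]
--         k += 1
--         if dados[p] != 7:
--             continue  # stale entry: the wrap bumped this cell past 7
--         while True:
--             dados[p] = 1
--             if p > 0:
--                 p -= 1
--                 dados[p] += 1
--                 if dados[p] != 7:
--                     break
--             else:
--                 dados[n - 1] += 1
--                 if dados[n - 1] == 7:
--                     pending.append(n - 1)
--                 break
--     return dados
-- ===== Notes on version B (the rewrite author's own statement) =====
-- stated objective: alternative
-- what changed: A repeatedly rescans the whole list with .index(7) after every single carry; B scans once, collects all positions holding a 7 into a worklist, and then propagates each carry locally (walking left through newly created 7s and enqueueing the wrap-created 7 at the last cell), so no repeated full scans are performed.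
import Mathlib
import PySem

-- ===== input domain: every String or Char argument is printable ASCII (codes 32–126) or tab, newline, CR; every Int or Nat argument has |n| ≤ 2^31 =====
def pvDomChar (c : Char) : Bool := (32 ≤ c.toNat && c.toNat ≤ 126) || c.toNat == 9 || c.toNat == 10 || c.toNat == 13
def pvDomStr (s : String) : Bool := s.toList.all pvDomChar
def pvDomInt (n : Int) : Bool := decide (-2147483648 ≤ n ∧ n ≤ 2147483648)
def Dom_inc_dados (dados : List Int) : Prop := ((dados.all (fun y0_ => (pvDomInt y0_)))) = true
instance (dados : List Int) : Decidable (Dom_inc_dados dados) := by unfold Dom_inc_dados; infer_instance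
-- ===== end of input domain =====

-- B replaces A's repeated `.index(7)` rescans by one initial scan plus a worklist of 7-positions,
-- each carry being propagated locally; both versions mutate `dados` in place in Python and return
-- it, and the equivalence proved here is about the returned value.

-- ===== PORT A =====
-- totality scaffolding shared by both ports: an upper bound on the number of loop iterations
-- (each firing of a 7 lowers the list's sum by 5 while the minimum never drops below min 1 (min of list))
def pvLow (a : List Int) : Int := a.foldr min 1
def pvFuel (a : List Int) : Nat := (a.sum - (a.length : Int) * pvLow a).toNat + 1

def incLoopA : Nat → List Int → List Int
  | 0, a => a
  | fuel+1, a =>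
    match PySem.List.index? a (7 : Int) with
    | none => a                                                     -- except ValueError: return dados
    | some i =>
      let a1 := PySem.List.pySetD a (i : Int) 1                     -- dados[index] = 1
      let a2 := PySem.List.pySetD a1 ((i : Int) - 1)
                  (PySem.List.pyGetD a1 ((i : Int) - 1) 0 + 1)      -- dados[index-1] += 1
      incLoopA fuel a2

def inc_dados (dados : List Int) : List Int :=
  let a0 := PySem.List.pySetD dados (-1) (PySem.List.pyGetD dados (-1) 0 + 1)   -- dados[-1] += 1
  incLoopA (pvFuel a0) a0

-- ===== PORT B =====
-- inner `while True` carry chain: fires position p, walks left through created 7s;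
-- on the index-0 wrap it bumps the last cell and reports whether it became a 7 (to be enqueued)
def incChainB (n : Nat) : Nat → List Int → List Int × Bool
  | 0, a =>
    let a1 := a.set 0 1
    let a2 := a1.set (n-1) (a1.getD (n-1) 0 + 1)
    (a2, a2.getD (n-1) 0 == 7)
  | p+1, a =>
    let a1 := a.set (p+1) 1
    let a2 := a1.set p (a1.getD p 0 + 1)
    if a2.getD p 0 ≠ 7 then (a2, false) else incChainB n p a2

-- outer loop over the worklist (Python's `pending` list with cursor k, modelled as the queue pending[k:])
def incLoopB (n : Nat) : Nat → List Int → List Nat → List Int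
  | 0, a, _ => a
  | _+1, a, [] => a
  | fuel+1, a, p :: rest =>
    if a.getD p 0 ≠ 7 then incLoopB n fuel a rest                   -- stale entry: skip
    else
      let r := incChainB n p a
      incLoopB n fuel r.1 (rest ++ if r.2 then [n-1] else [])

def inc_dados_alt (dados : List Int) : List Int :=
  let a0 := PySem.List.pySetD dados (-1) (PySem.List.pyGetD dados (-1) 0 + 1)   -- dados[-1] += 1
  let n := a0.length
  let pending := (List.range n).filter (fun i => a0.getD i 0 == 7)  -- [i for i,v in enumerate(dados) if v == 7]
  incLoopB n (pending.length + pvFuel a0) a0 pending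

-- ===== PRECONDITION & SPEC =====
-- A raises IndexError on the empty list (dados[-1] += 1); excluded.
def Pre_inc_dados (dados : List Int) : Prop := dados ≠ []
instance (dados : List Int) : Decidable (Pre_inc_dados dados) := by unfold Pre_inc_dados; infer_instance
def pvWitness_inc_dados : List Int := [1, 2]

def Spec_inc_dados (dados : List Int) (out : List Int) : Prop := out = inc_dados_alt dados
instance (dados : List Int) (out : List Int) : Decidable (Spec_inc_dados dados out) := by unfold Spec_inc_dados; infer_instance

-- ===== CLAIM (what is proved, stated in full; the proofs are below) =====
def Claim_equal_inc_dados : Prop := ∀ (dados : List Int), Dom_inc_dados dados → Pre_inc_dados dados → Spec_inc_dados dados (inc_dados dados)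

-- ===== LEMMAS AND PROOFS =====

-- the integer measure: sum minus length times (a lower bound on every element, capped at 1)
def pvMint (a : List Int) : Int := a.sum - (a.length : Int) * pvLow a
def pvM (a : List Int) : Nat := (pvMint a).toNat

lemma pvLow_le_one (a : List Int) : pvLow a ≤ 1 := by
  induction a with
  | nil => simp [pvLow]
  | cons x t ih => simp only [pvLow, List.foldr] at *; exact le_trans (min_le_right _ _) ih

lemma pvLow_le_mem (a : List Int) (x : Int) (hx : x ∈ a) : pvLow a ≤ x := by
  induction a with
  | nil => cases hx
  | cons y t ih =>
    rcases List.mem_cons.1 hx with h | h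
    · rw [h]; exact min_le_left y (pvLow t)
    · exact le_trans (min_le_right _ _) (ih h)

lemma le_pvLow (a : List Int) (c : Int) (h1 : c ≤ 1) (h : ∀ x ∈ a, c ≤ x) : c ≤ pvLow a := by
  induction a with
  | nil => simpa [pvLow] using h1
  | cons y t ih =>
    have := h y (List.mem_cons_self)
    have := ih (fun x hx => h x (List.mem_cons_of_mem _ hx))
    simp only [pvLow, List.foldr] at *
    exact le_min ‹c ≤ y› ‹_›

lemma mul_pvLow_le_sum (l : List Int) (c : Int) (h : ∀ x ∈ l, c ≤ x) :
    (l.length : Int) * c ≤ l.sum := by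
  induction l with
  | nil => simp
  | cons y t ih =>
    have h1 := h y (List.mem_cons_self)
    have h2 := ih (fun x hx => h x (List.mem_cons_of_mem _ hx))
    simp only [List.sum_cons, List.length_cons]
    push_cast
    nlinarith

lemma pvMint_nonneg (a : List Int) : 0 ≤ pvMint a := by
  have := mul_pvLow_le_sum a (pvLow a) (fun x hx => pvLow_le_mem a x hx)
  unfold pvMint; omega

-- A's single firing step (dados[index] = 1; dados[index-1] += 1), exactly as port A writes it
def fireStep (a : List Int) (i : Nat) : List Int :=
  let a1 := PySem.List.pySetD a (i : Int) 1
  PySem.List.pySetD a1 ((i : Int) - 1) (PySem.List.pyGetD a1 ((i : Int) - 1) 0 + 1)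

lemma pySetD_neg_one (xs : List Int) (h : xs ≠ []) (v : Int) :
    PySem.List.pySetD xs (-1) v = xs.set (xs.length - 1) v := by
  have h0 : xs.length ≠ 0 := by simpa using h
  have h1 : (-(xs.length : Int) ≤ -1) := by omega
  simp [PySem.List.pySetD, PySem.List.pySet?, PySem.List.pyIdx?, h1]

lemma fireStep_zero (a : List Int) (h : a ≠ []) :
    fireStep a 0 =
      (a.set 0 1).set (a.length - 1) ((a.set 0 1).getD (a.length - 1) 0 + 1) := by
  have h0 : a.length ≠ 0 := by simpa using h
  have h1 : (a.set 0 1) ≠ [] := by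
    intro hc; apply h; simpa using congrArg List.length hc
  have hlen : (a.set 0 1).length = a.length := by simp
  have hg : PySem.List.pyGetD (a.set 0 1) (-1) 0 = (a.set 0 1).getD (a.length - 1) 0 := by
    rw [PySem.List.pyGetD_neg_one _ _ h1, List.getLast_eq_getElem h1,
        List.getD_eq_getElem _ _ (by simp; omega)]
    simp
  show PySem.List.pySetD (PySem.List.pySetD a ((0:Nat) : Int) 1) (((0:Nat) : Int) - 1)
      (PySem.List.pyGetD (PySem.List.pySetD a ((0:Nat) : Int) 1) (((0:Nat) : Int) - 1) 0 + 1) = _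
  rw [PySem.List.pySetD_natCast]
  have : ((0:Nat) : Int) - 1 = -1 := by norm_num
  rw [this, hg, pySetD_neg_one _ h1, hlen]

lemma fireStep_succ (a : List Int) (i : Nat) :
    fireStep a (i+1) =
      (a.set (i+1) 1).set i ((a.set (i+1) 1).getD i 0 + 1) := by
  show PySem.List.pySetD (PySem.List.pySetD a (((i+1:Nat)) : Int) 1) ((((i+1:Nat)) : Int) - 1)
      (PySem.List.pyGetD (PySem.List.pySetD a (((i+1:Nat)) : Int) 1) ((((i+1:Nat)) : Int) - 1) 0 + 1) = _
  have hc : (((i+1:Nat)) : Int) - 1 = ((i : Nat) : Int) := by push_cast; ring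
  rw [PySem.List.pySetD_natCast, hc, PySem.List.pyGetD_natCast, PySem.List.pySetD_natCast]

-- the measure drops (by at least 5) at every firing of a leftmost 7
lemma pvM_set_set_lt (a : List Int) (i j : Nat) (hi : i < a.length) (hj : j < a.length)
    (h7 : a[i] = 7) :
    pvM ((a.set i 1).set j ((a.set i 1).getD j 0 + 1)) < pvM a := by
  set a1 := a.set i 1 with ha1
  have hj1 : j < a1.length := by rw [ha1]; simpa using hj
  have hgd : a1.getD j 0 = a1[j] := List.getD_eq_getElem _ _ hj1
  set a2 := a1.set j (a1.getD j 0 + 1) with ha2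
  have hlen2 : a2.length = a.length := by simp [ha2, ha1]
  have hsum1 : a1.sum = a.sum - 6 := by
    rw [ha1, List.sum_set']; rw [dif_pos hi, h7]; ring
  have hsum2 : a2.sum = a.sum - 5 := by
    rw [ha2, List.sum_set', dif_pos hj1, hgd, hsum1]; ring
  have hlow1 : pvLow a ≤ pvLow a2 := by
    apply le_pvLow
    · exact pvLow_le_one a
    · intro x hx
      rcases List.mem_or_eq_of_mem_set hx with hx1 | hx1
      · rcases List.mem_or_eq_of_mem_set hx1 with hx2 | hx2
        · exact pvLow_le_mem a x hx2
        · subst hx2; exact pvLow_le_one a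
      · subst hx1
        have hmem : a1[j] ∈ a1 := List.getElem_mem hj1
        have : pvLow a ≤ a1[j] := by
          rcases List.mem_or_eq_of_mem_set hmem with hx2 | hx2
          · exact pvLow_le_mem a _ hx2
          · rw [hx2]; exact pvLow_le_one a
        rw [hgd]; omega
  have hge : 7 - pvLow a ≤ pvMint a := by
    -- the 7 at position i forces the measure to be at least 7 - low ≥ 6
    set b := a.set i (pvLow a) with hb
    have hsb : b.sum = a.sum - 7 + pvLow a := by
      rw [hb, List.sum_set', dif_pos hi, h7]; ring
    have hlb : b.length = a.length := by simp [hb]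
    have hbl : (b.length : Int) * pvLow a ≤ b.sum := by
      apply mul_pvLow_le_sum
      intro x hx
      rcases List.mem_or_eq_of_mem_set hx with hx1 | hx1
      · exact pvLow_le_mem a x hx1
      · omega
    unfold pvMint
    rw [hsb, hlb] at hbl
    omega
  have hm2 : pvMint a2 ≤ pvMint a - 5 := by
    unfold pvMint
    rw [hsum2, hlen2]
    have : (a.length : Int) * pvLow a ≤ (a.length : Int) * pvLow a2 :=
      mul_le_mul_of_nonneg_left hlow1 (by positivity)
    omega
  have h0 := pvMint_nonneg a2
  have h1 := pvLow_le_one a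
  unfold pvM
  omega

lemma index?_iff (a : List Int) (p : Nat) :
    PySem.List.index? a (7:Int) = some p ↔
      ∃ hp : p < a.length, a[p] = 7 ∧ ∀ j (hj : j < p), a[j] ≠ 7 := by
  constructor
  · exact PySem.List.getElem_of_index?_eq_some
  · rintro ⟨hp, h7, hlow⟩
    have hmem : (7:Int) ∈ a := List.mem_iff_getElem.2 ⟨p, hp, h7⟩
    have hsome : (PySem.List.index? a (7:Int)).isSome = true :=
      (PySem.List.index?_isSome_iff a 7).2 hmem
    rcases Option.isSome_iff_exists.1 hsome with ⟨k, hk⟩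
    rcases PySem.List.getElem_of_index?_eq_some hk with ⟨hk1, hk2, hk3⟩
    rcases lt_trichotomy k p with h | h | h
    · exact absurd hk2 (hlow k h)
    · rw [hk, h]
    · exact absurd h7 (hk3 p h)

lemma pvM_fireStep_lt (a : List Int) (i : Nat)
    (h : PySem.List.index? a (7:Int) = some i) : pvM (fireStep a i) < pvM a := by
  rcases (index?_iff a i).1 h with ⟨hi, h7, _⟩
  have hne : a ≠ [] := by rintro rfl; simp at hi
  cases i with
  | zero =>
    rw [fireStep_zero a hne]
    exact pvM_set_set_lt a 0 (a.length - 1) hi (by omega) h7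
  | succ i =>
    rw [fireStep_succ]
    exact pvM_set_set_lt a (i+1) i hi (by omega) h7

-- the mathematical fixpoint both loops compute: fire the leftmost 7 until none remains
def iterFire (a : List Int) : List Int :=
  match h : PySem.List.index? a (7:Int) with
  | none => a
  | some i => iterFire (fireStep a i)
termination_by pvM a
decreasing_by exact pvM_fireStep_lt a i h

lemma iterFire_none (a : List Int) (h : PySem.List.index? a (7:Int) = none) : iterFire a = a := by
  rw [iterFire, h]

lemma iterFire_some (a : List Int) (i : Nat) (h : PySem.List.index? a (7:Int) = some i) :
    iterFire a = iterFire (fireStep a i) := by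
  rw [iterFire, h]

-- A's loop reaches the fixpoint when given enough fuel
lemma incLoopA_eq (fuel : Nat) : ∀ a : List Int, pvM a < fuel → incLoopA fuel a = iterFire a := by
  induction fuel with
  | zero => intro a h; omega
  | succ fuel ih =>
    intro a h
    cases hidx : PySem.List.index? a (7:Int) with
    | none => rw [incLoopA, hidx, iterFire_none a hidx]
    | some i =>
      rw [incLoopA, hidx]
      have hlt := pvM_fireStep_lt a i hidx
      rw [iterFire_some a i hidx]
      exact ih (fireStep a i) (by omega)

lemma getD_set_ne (l : List Int) (i j : Nat) (v : Int) (h : i ≠ j) :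
    (l.set i v).getD j 0 = l.getD j 0 := by
  simp [List.getD_eq_getElem?_getD, List.getElem?_set_ne h]

lemma getD_set_self (l : List Int) (i : Nat) (h : i < l.length) (v : Int) :
    (l.set i v).getD i 0 = v := by
  simp [List.getD_eq_getElem?_getD, h]

-- ===== the chain lemma: one run of B's inner carry loop performs exactly A's next firings =====
lemma chain_spec (n : Nat) (h0 : 0 < n) :
    ∀ (p : Nat) (a : List Int), a.length = n → p < n →
      a.getD p 0 = 7 → (∀ q, q < p → a.getD q 0 ≠ 7) →
      (incChainB n p a).1.length = n ∧
      iterFire (incChainB n p a).1 = iterFire a ∧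
      pvM (incChainB n p a).1 < pvM a ∧
      (∀ i, i < n → i ≠ n-1 → (incChainB n p a).1.getD i 0 = 7 → p < i ∧ a.getD i 0 = 7) ∧
      ((incChainB n p a).1.getD (n-1) 0 = 7 →
        (incChainB n p a).2 = true ∨ (p < n-1 ∧ a.getD (n-1) 0 = 7)) := by
  intro p
  induction p with
  | zero =>
    intro a hlen hp h7 hlow
    have hne : a ≠ [] := by rw [← List.length_pos_iff]; omega
    have h7' : a[0] = 7 := by rw [← List.getD_eq_getElem a 0 (by omega)]; exact h7
    have hidx : PySem.List.index? a (7:Int) = some 0 :=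
      (index?_iff a 0).2 ⟨by omega, h7', fun j hj => by omega⟩
    set a1 := a.set 0 1 with ha1
    set a2 := a1.set (n-1) (a1.getD (n-1) 0 + 1) with ha2
    have hch : incChainB n 0 a = (a2, a2.getD (n-1) 0 == 7) := rfl
    have hlen2 : a2.length = n := by simp [ha2, ha1, hlen]
    have hfire : fireStep a 0 = a2 := by
      rw [fireStep_zero a hne, hlen, ← ha1, ← ha2]
    refine ⟨by rw [hch]; exact hlen2, ?_, ?_, ?_, ?_⟩
    · rw [hch]; rw [iterFire_some a 0 hidx, hfire]
    · rw [hch]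
      have := pvM_set_set_lt a 0 (a.length - 1) (by omega) (by omega) h7'
      rw [hlen] at this
      exact this
    · intro i hi hine hi7
      rw [hch] at hi7
      simp only at hi7
      have hi0 : i ≠ 0 := by
        intro hh
        rw [hh, ha2, getD_set_ne _ _ _ _ (by omega), ha1,
            getD_set_self _ _ (by omega) 1] at hi7
        norm_num at hi7
      refine ⟨by omega, ?_⟩
      rw [ha2, getD_set_ne _ _ _ _ (by omega), ha1, getD_set_ne _ _ _ _ (by omega)] at hi7
      exact hi7
    · intro h7'
      left
      rw [hch] at h7' ⊢
      simpa using h7'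
  | succ p ih =>
    intro a hlen hp h7 hlow
    have h7' : a[p+1] = 7 := by rw [← List.getD_eq_getElem a 0 (by omega)]; exact h7
    have hidx : PySem.List.index? a (7:Int) = some (p+1) := by
      refine (index?_iff a (p+1)).2 ⟨by omega, h7', fun j hj => ?_⟩
      rw [← List.getD_eq_getElem a 0 (by omega)]
      exact hlow j hj
    set a1 := a.set (p+1) 1 with ha1
    set a2 := a1.set p (a1.getD p 0 + 1) with ha2
    have hlen2 : a2.length = n := by simp [ha2, ha1, hlen]
    have hfire : fireStep a (p+1) = a2 := by rw [fireStep_succ, ← ha1, ← ha2]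
    have hstep : iterFire a = iterFire a2 := by rw [iterFire_some a (p+1) hidx, hfire]
    have hM : pvM a2 < pvM a := by
      have := pvM_set_set_lt a (p+1) p (by omega) (by omega) h7'
      rw [← ha1, ← ha2] at this
      exact this
    have hgd_p1 : a2.getD (p+1) 0 = 1 := by
      rw [ha2, getD_set_ne _ _ _ _ (by omega), ha1, getD_set_self _ _ (by omega) 1]
    have hgd_other : ∀ i, i ≠ p → i ≠ p+1 → a2.getD i 0 = a.getD i 0 := by
      intro i h1 h2
      rw [ha2, getD_set_ne _ _ _ _ (fun hh => h1 hh.symm), ha1,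
          getD_set_ne _ _ _ _ (fun hh => h2 hh.symm)]
    by_cases hcond : a2.getD p 0 ≠ 7
    · have hch : incChainB n (p+1) a = (a2, false) := by
        show (if a2.getD p 0 ≠ 7 then (a2, false) else incChainB n p a2) = _
        rw [if_pos hcond]
      refine ⟨by rw [hch]; exact hlen2, by rw [hch]; exact hstep.symm, by rw [hch]; exact hM, ?_, ?_⟩
      · intro i hi hine hi7
        rw [hch] at hi7
        simp only at hi7
        have hip : i ≠ p := by rintro rfl; exact hcond hi7
        have hip1 : i ≠ p+1 := by
          rintro rfl
          rw [hgd_p1] at hi7; norm_num at hi7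
        rw [hgd_other i hip hip1] at hi7
        have : ¬ i < p+1 := fun hh => hlow i hh hi7
        exact ⟨by omega, hi7⟩
      · intro h77
        rw [hch] at h77 ⊢
        simp only at h77 ⊢
        right
        have hip : n-1 ≠ p := by rintro hh; rw [hh] at h77; exact hcond h77
        have hip1 : n-1 ≠ p+1 := by
          rintro hh; rw [hh, hgd_p1] at h77; norm_num at h77
        rw [hgd_other _ hip hip1] at h77
        have : ¬ n-1 < p+1 := fun hh => hlow _ hh h77
        exact ⟨by omega, h77⟩
    · rw [not_not] at hcond
      have hch : incChainB n (p+1) a = incChainB n p a2 := by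
        show (if a2.getD p 0 ≠ 7 then (a2, false) else incChainB n p a2) = _
        rw [if_neg (by simpa using hcond)]
      have hlow2 : ∀ q, q < p → a2.getD q 0 ≠ 7 := by
        intro q hq
        rw [hgd_other q (by omega) (by omega)]
        exact hlow q (by omega)
      obtain ⟨ihlen, ihiter, ihM, ihC3, ihC4⟩ := ih a2 hlen2 (by omega) hcond hlow2
      refine ⟨by rw [hch]; exact ihlen, ?_, ?_, ?_, ?_⟩
      · rw [hch, ihiter, hstep]
      · rw [hch]; omega
      · intro i hi hine hi7
        rw [hch] at hi7
        obtain ⟨hpi, hi7'⟩ := ihC3 i hi hine hi7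
        have hip1 : i ≠ p+1 := by
          rintro rfl; rw [hgd_p1] at hi7'; norm_num at hi7'
        rw [hgd_other i (by omega) hip1] at hi7'
        exact ⟨by omega, hi7'⟩
      · intro h77
        rw [hch] at h77 ⊢
        rcases ihC4 h77 with hl | ⟨hpn, h7n⟩
        · left; exact hl
        · right
          have hip1 : n-1 ≠ p+1 := by
            rintro hh; rw [hh, hgd_p1] at h7n; norm_num at h7n
          rw [hgd_other _ (by omega) hip1] at h7n
          exact ⟨by omega, h7n⟩

-- ===== B's outer loop reaches the same fixpoint =====
lemma incLoopB_eq (n : Nat) (h0 : 0 < n) (fuel : Nat) :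
    ∀ (a : List Int) (q : List Nat), a.length = n →
      (∀ i ∈ q, i < n) → q.Pairwise (· ≤ ·) →
      (∀ i, i < n → a.getD i 0 = 7 → i ∈ q) →
      q.length + pvM a < fuel →
      incLoopB n fuel a q = iterFire a := by
  induction fuel with
  | zero => intro a q _ _ _ _ hf; omega
  | succ fuel ih =>
    intro a q hlen hmem hsort hcomp hf
    cases q with
    | nil =>
      have hnone : PySem.List.index? a (7:Int) = none := by
        rw [PySem.List.index?_eq_none_iff]
        intro hmem7
        rcases List.mem_iff_getElem.1 hmem7 with ⟨i, hi, hgi⟩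
        have := hcomp i (by omega) (by rw [List.getD_eq_getElem a 0 hi]; exact hgi)
        simp at this
      rw [iterFire_none a hnone]
      rfl
    | cons p rest =>
      have hp : p < n := hmem p (List.mem_cons_self)
      by_cases h7 : a.getD p 0 ≠ 7
      · have hstep : incLoopB n (fuel+1) a (p :: rest) = incLoopB n fuel a rest := by
          show (if a.getD p 0 ≠ 7 then _ else _) = _
          rw [if_pos h7]
        rw [hstep]
        apply ih a rest hlen (fun i hi => hmem i (List.mem_cons_of_mem _ hi))
          (List.pairwise_cons.1 hsort).2 ?_ (by simp at hf; omega)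
        intro i hi hgi
        rcases List.mem_cons.1 (hcomp i hi hgi) with h | h
        · exact absurd hgi (h ▸ h7)
        · exact h
      · rw [not_not] at h7
        have hsorthead : ∀ x ∈ rest, p ≤ x := (List.pairwise_cons.1 hsort).1
        have hlow : ∀ q', q' < p → a.getD q' 0 ≠ 7 := by
          intro q' hq' hg
          have hq'' := hcomp q' (by omega) hg
          rcases List.mem_cons.1 hq'' with h | h
          · omega
          · have := hsorthead q' h; omega
        obtain ⟨clen, citer, cM, cC3, cC4⟩ := chain_spec n h0 p a hlen hp h7 hlow
        set r := incChainB n p a with hr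
        have hite : ∀ i, i ∈ (if r.2 then [n-1] else []) → i = n-1 := by
          cases r.2 <;> simp
        have hstep : incLoopB n (fuel+1) a (p :: rest)
            = incLoopB n fuel r.1 (rest ++ if r.2 then [n-1] else []) := by
          show (if a.getD p 0 ≠ 7 then _ else _) = _
          rw [if_neg (by simpa using h7)]
        have h1 : ∀ i ∈ (rest ++ if r.2 then [n-1] else []), i < n := by
          intro i hi
          rcases List.mem_append.1 hi with h | h
          · exact hmem i (List.mem_cons_of_mem _ h)
          · have := hite i h; omega
        have h2 : (rest ++ if r.2 then [n-1] else []).Pairwise (· ≤ ·) := by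
          rw [List.pairwise_append]
          refine ⟨(List.pairwise_cons.1 hsort).2, ?_, ?_⟩
          · cases r.2 <;> simp
          · intro x hx y hy
            have hxn := hmem x (List.mem_cons_of_mem _ hx)
            have := hite y hy
            omega
        have h3 : ∀ i, i < n → r.1.getD i 0 = 7 → i ∈ (rest ++ if r.2 then [n-1] else []) := by
          intro i hi hgi
          by_cases hin : i = n-1
          · subst hin
            rcases cC4 hgi with h | ⟨hpn, h7n⟩
            · exact List.mem_append.2 (Or.inr (by rw [h]; simp))
            · refine List.mem_append.2 (Or.inl ?_)
              rcases List.mem_cons.1 (hcomp (n-1) hi h7n) with h | h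
              · omega
              · exact h
          · obtain ⟨hpi, h7i⟩ := cC3 i hi hin hgi
            refine List.mem_append.2 (Or.inl ?_)
            rcases List.mem_cons.1 (hcomp i hi h7i) with h | h
            · omega
            · exact h
        have h4 : (rest ++ if r.2 then [n-1] else []).length + pvM r.1 < fuel := by
          have happ : (if r.2 then [n-1] else []).length ≤ 1 := by cases r.2 <;> simp
          rw [List.length_append]
          simp at hf
          omega
        rw [hstep]
        exact (ih r.1 _ clen h1 h2 h3 h4).trans citer

-- ===== VERDICT (by name: the statement is the Claim_ definition above) =====
theorem inc_dados_spec : Claim_equal_inc_dados := by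
  intro dados _hdom hpre
  unfold Spec_inc_dados inc_dados inc_dados_alt
  set a0 := PySem.List.pySetD dados (-1) (PySem.List.pyGetD dados (-1) 0 + 1) with ha0
  have hlen : a0.length = dados.length := PySem.List.length_pySetD ..
  have h0 : 0 < a0.length := by
    rw [hlen]; exact List.length_pos_iff.2 hpre
  rw [incLoopA_eq (pvFuel a0) a0 (by unfold pvFuel pvM pvMint; omega)]
  rw [incLoopB_eq a0.length h0 _ a0 _ rfl ?_ ?_ ?_ ?_]
  · intro i hi
    simp only [List.mem_filter, List.mem_range] at hi
    exact hi.1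
  · exact (List.pairwise_lt_range).filter _ |>.imp (by omega)
  · intro i hi h7
    simp only [List.mem_filter, List.mem_range]
    exact ⟨hi, by simpa using h7⟩
  · unfold pvFuel pvM pvMint; omega
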